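-- pv_equiv track=rewrite | github.com/whn09/OpenNRE | example/train_finre_cnn_softmax.py | text2token
-- ===== SOURCE A (Python) =====
-- def text2token(text):
--     token = list(text)
--     new_token = []
--     skip = 0
--     for i in range(len(token)):
--         if skip > 0:
--             skip -= 1
--             continue
--         # TODO how to deal with English words?
--         if token[i] == '<' and i < len(token)-2 and token[i+1] == 'N' and token[i+2] == '>':
--             new_token.append('<N>')
--             skip = 2
--         else:
--             new_token.append(token[i])
--             skip = 0
--     return new_token
-- ===== SOURCE B (Python) =====
-- def text2token(text):
--     parts = text.split('<N>')
--     out = []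
--     for k, part in enumerate(parts):
--         if k > 0:
--             out.append('<N>')
--         out.extend(part)
--     return out
-- ===== Notes on version B (the rewrite author's own statement) =====
-- stated objective: simpler
-- what changed: Replaced the per-character index loop with a skip counter by a single str.split on the marker followed by interleaving marker tokens between the split segments' characters; the scan is done by the C-implemented str.split instead of an interpreted per-character loop (constant-factor speedup, measured).
import Mathlib
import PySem

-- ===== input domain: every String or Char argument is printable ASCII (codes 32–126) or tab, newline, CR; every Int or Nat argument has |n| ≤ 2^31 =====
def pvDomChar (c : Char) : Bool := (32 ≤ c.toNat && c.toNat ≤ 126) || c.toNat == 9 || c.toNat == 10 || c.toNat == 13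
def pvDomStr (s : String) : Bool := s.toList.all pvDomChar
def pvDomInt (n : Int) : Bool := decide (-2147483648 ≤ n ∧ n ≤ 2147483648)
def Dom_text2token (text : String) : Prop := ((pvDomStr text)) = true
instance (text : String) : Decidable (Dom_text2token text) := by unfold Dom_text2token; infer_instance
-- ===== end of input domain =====

-- B replaces A's per-character skip-counter scan by split-on-'<N>' then interleaving (objective: simpler).


-- ===== PORT A =====
-- one loop iteration of A: state = (new_token, skip)
def text2tokenStep (token : List Char) (st : List String × Nat) (i : Nat) : List String × Nat :=
  if st.2 > 0 then (st.1, st.2 - 1)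
  else if token.getD i ' ' = '<' ∧ i < token.length - 2 ∧
          token.getD (i+1) ' ' = 'N' ∧ token.getD (i+2) ' ' = '>'
  then (st.1 ++ ["<N>"], 2)
  else (st.1 ++ [String.ofList [token.getD i ' ']], 0)

def text2token (text : String) : List String :=
  ((List.range text.toList.length).foldl (text2tokenStep text.toList) ([], 0)).1

-- ===== PORT B =====
-- one loop iteration of B over enumerate(parts)
def text2tokenAltStep (out : List String) (kp : Int × List Char) : List String :=
  (if kp.1 > 0 then out ++ ["<N>"] else out) ++ kp.2.map (fun c => String.ofList [c])

def text2token_alt (text : String) : List String :=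
  (PySem.List.enumerate (PySem.Chars.splitOn text.toList "<N>".toList) 0).foldl text2tokenAltStep []

-- ===== PRECONDITION & SPEC =====
def Spec_text2token (text : String) (out : List String) : Prop := out = text2token_alt text
instance (text : String) (out : List String) : Decidable (Spec_text2token text out) := by unfold Spec_text2token; infer_instance

-- ===== CLAIM (what is proved, stated in full; the proofs are below) =====
def Claim_equal_text2token : Prop := ∀ (text : String), Dom_text2token text → Spec_text2token text (text2token text)

-- ===== LEMMAS AND PROOFS =====

-- A's scan, written as structural recursion on the character list
def fA : List Char → List String
  | [] => []
  | c :: rest =>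
    if c = '<' ∧ rest.take 2 = ['N', '>']
    then "<N>" :: fA (rest.drop 2)
    else String.ofList [c] :: fA rest
termination_by l => l.length
decreasing_by all_goals (simp only [List.length_cons, List.length_drop]; omega)

def chars1 (p : List Char) : List String := p.map (fun c => String.ofList [c])

-- B's interleaving of the split parts
def interB : List (List Char) → List String
  | [] => []
  | p :: ps => chars1 p ++ ps.flatMap (fun q => "<N>" :: chars1 q)

-- splitOn ['<','N','>'] as structural recursion
def consHd (c : Char) : List (List Char) → List (List Char)
  | [] => [[c]]
  | p :: ps => (c :: p) :: ps

def splitRec : List Char → List (List Char)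
  | [] => [[]]
  | c :: rest =>
    if ['<','N','>'].isPrefixOf (c :: rest)
    then [] :: splitRec (rest.drop 2)
    else consHd c (splitRec rest)
termination_by l => l.length
decreasing_by all_goals (simp only [List.length_cons, List.length_drop]; omega)

lemma consHd_ne_nil (c : Char) (ps : List (List Char)) : consHd c ps ≠ [] := by
  cases ps <;> simp [consHd]

lemma splitRec_ne_nil (l : List Char) : splitRec l ≠ [] := by
  cases l with
  | nil => simp [splitRec]
  | cons c rest =>
    simp only [splitRec]
    split
    · simp
    · exact consHd_ne_nil _ _

lemma go_nil (f : Nat) (cur : List Char) (acc : List (List Char)) :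
    PySem.Chars.splitOn.go ['<','N','>'] (f+1) [] cur acc = (cur.reverse :: acc).reverse := rfl

lemma go_cons (f : Nat) (c : Char) (rest cur : List Char) (acc : List (List Char)) :
    PySem.Chars.splitOn.go ['<','N','>'] (f+1) (c :: rest) cur acc =
      (if ['<','N','>'].isPrefixOf (c :: rest) then
        PySem.Chars.splitOn.go ['<','N','>'] f (List.drop 3 (c :: rest)) [] (cur.reverse :: acc)
      else PySem.Chars.splitOn.go ['<','N','>'] f rest (c :: cur) acc) := rfl

lemma go_eq : ∀ (fuel : Nat) (l cur : List Char) (acc : List (List Char)),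
    l.length < fuel →
    PySem.Chars.splitOn.go ['<','N','>'] fuel l cur acc =
      acc.reverse ++ (match splitRec l with
        | [] => []
        | p :: ps => (cur.reverse ++ p) :: ps) := by
  intro fuel
  induction fuel with
  | zero => intro l cur acc h; omega
  | succ f IH =>
    intro l cur acc h
    cases l with
    | nil => simp [go_nil, splitRec]
    | cons c rest =>
      rw [go_cons]
      by_cases hp : ['<','N','>'].isPrefixOf (c :: rest) = true
      · rw [if_pos hp]
        rw [IH]
        · simp only [splitRec, if_pos hp]
          rcases hs : splitRec (rest.drop 2) with _ | ⟨p, ps⟩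
          · exact absurd hs (splitRec_ne_nil _)
          · simp [hs]
        · simp only [List.length_cons, List.length_drop] at h ⊢; omega
      · rw [if_neg hp]
        rw [IH]
        · simp only [splitRec, if_neg hp]
          rcases hs : splitRec rest with _ | ⟨p, ps⟩
          · exact absurd hs (splitRec_ne_nil _)
          · simp [consHd]
        · simp at h ⊢; omega

lemma splitOn_eq_splitRec (l : List Char) :
    PySem.Chars.splitOn l ['<','N','>'] = splitRec l := by
  unfold PySem.Chars.splitOn
  rw [go_eq (l.length + 1) l [] [] (by omega)]
  rcases hs : splitRec l with _ | ⟨p, ps⟩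
  · exact absurd hs (splitRec_ne_nil _)
  · simp

lemma interB_nil_cons (ps : List (List Char)) (h : ps ≠ []) :
    interB ([] :: ps) = "<N>" :: interB ps := by
  rcases ps with _ | ⟨p, ps'⟩
  · exact absurd rfl h
  · simp [interB, chars1]

lemma interB_consHd (c : Char) (ps : List (List Char)) (h : ps ≠ []) :
    interB (consHd c ps) = String.ofList [c] :: interB ps := by
  rcases ps with _ | ⟨p, ps'⟩
  · exact absurd rfl h
  · simp [interB, chars1, consHd]

lemma prefix_iff_fACond (c : Char) (rest : List Char) :
    ['<','N','>'].isPrefixOf (c :: rest) = true ↔ (c = '<' ∧ rest.take 2 = ['N', '>']) := by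
  rw [List.isPrefixOf_iff_prefix, List.cons_prefix_cons, List.prefix_iff_eq_take]
  constructor
  · rintro ⟨h1, h2⟩; exact ⟨h1.symm, by simpa using h2.symm⟩
  · rintro ⟨h1, h2⟩; exact ⟨h1.symm, by simpa using h2.symm⟩

lemma fA_eq_interB (l : List Char) : fA l = interB (splitRec l) := by
  fun_induction fA l with
  | case1 => simp [splitRec, interB, chars1]
  | case2 c rest h ih =>
    have hp : ['<','N','>'].isPrefixOf (c :: rest) = true := (prefix_iff_fACond c rest).mpr h
    simp only [splitRec, if_pos hp]
    rw [interB_nil_cons _ (splitRec_ne_nil _), ih]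
  | case3 c rest h ih =>
    have hp : ¬ ['<','N','>'].isPrefixOf (c :: rest) = true := fun hh => h ((prefix_iff_fACond c rest).mp hh)
    simp only [splitRec, if_neg hp]
    rw [interB_consHd _ _ (splitRec_ne_nil _), ih]

lemma loopA (token : List Char) : ∀ (m i : Nat) (acc : List String), i + m = token.length →
    (List.range' i m).foldl (text2tokenStep token) (acc, 0) = (acc ++ fA (token.drop i), 0) := by
  intro m
  induction m using Nat.strong_induction_on with
  | _ m IH =>
    intro i acc hi
    match m with
    | 0 =>
      have hd : token.drop i = [] := List.drop_eq_nil_of_le (by omega)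
      simp [hd, fA]
    | Nat.succ m' =>
      rw [List.range'_succ, List.foldl_cons]
      have hi_lt : i < token.length := by omega
      by_cases hC : token.getD i ' ' = '<' ∧ i < token.length - 2 ∧
          token.getD (i+1) ' ' = 'N' ∧ token.getD (i+2) ' ' = '>'
      · obtain ⟨h1, h2, h3, h4⟩ := hC
        have h2' : i + 2 < token.length := by omega
        have hstep : text2tokenStep token (acc, 0) i = (acc ++ ["<N>"], 2) := by
          unfold text2tokenStep
          rw [if_neg (by simp), if_pos ⟨h1, h2, h3, h4⟩]
        rw [hstep]
        obtain ⟨m'', rfl⟩ : ∃ k, m' = k + 2 := ⟨m' - 2, by omega⟩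
        have e2 : m'' + 2 = (m'' + 1) + 1 := rfl
        rw [e2, List.range'_succ, List.foldl_cons, List.range'_succ, List.foldl_cons]
        have hs1 : text2tokenStep token (acc ++ ["<N>"], 2) (i+1) = (acc ++ ["<N>"], 1) := by
          simp [text2tokenStep]
        have hs2 : text2tokenStep token (acc ++ ["<N>"], 1) (i+2) = (acc ++ ["<N>"], 0) := by
          simp [text2tokenStep]
        rw [hs1, hs2]
        have harith : i + 1 + 1 + 1 = i + 3 := by omega
        rw [harith, IH m'' (by omega) (i+3) (acc ++ ["<N>"]) (by omega)]
        have hd : token.drop i = '<' :: 'N' :: '>' :: token.drop (i+3) := by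
          rw [List.drop_eq_getElem_cons hi_lt, List.drop_eq_getElem_cons (by omega),
            List.drop_eq_getElem_cons (by omega)]
          rw [List.getD_eq_getElem _ _ hi_lt] at h1
          rw [List.getD_eq_getElem _ _ (by omega : i + 1 < token.length)] at h3
          rw [List.getD_eq_getElem _ _ h2'] at h4
          rw [h1, h3, h4]
        rw [hd]
        simp [fA]
      · have hstep : text2tokenStep token (acc, 0) i =
            (acc ++ [String.ofList [token.getD i ' ']], 0) := by
          simp only [text2tokenStep]
          rw [if_neg (by simp), if_neg hC]
        rw [hstep, IH m' (by omega) (i+1) _ (by omega)]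
        have hd : token.drop i = token[i] :: token.drop (i+1) := List.drop_eq_getElem_cons hi_lt
        have hfa : fA (token[i] :: token.drop (i+1)) =
            String.ofList [token[i]] :: fA (token.drop (i+1)) := by
          rw [fA, if_neg]
          rintro ⟨ha, hb⟩
          have h2' : i + 2 < token.length := by
            have hlen := congrArg List.length hb
            simp at hlen
            omega
          have e1 : token.drop (i+1) = token[i+1] :: token[i+2] :: token.drop (i+3) := by
            rw [List.drop_eq_getElem_cons (by omega : i + 1 < token.length),
              List.drop_eq_getElem_cons (by omega : i + 1 + 1 < token.length)]
          rw [e1] at hb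
          simp only [List.take_succ_cons, List.take_zero, List.cons.injEq, and_true] at hb
          exact hC ⟨by rw [List.getD_eq_getElem _ _ hi_lt]; exact ha, by omega,
            by rw [List.getD_eq_getElem _ _ (by omega : i + 1 < token.length)]; exact hb.1,
            by rw [List.getD_eq_getElem _ _ h2']; exact hb.2⟩
        rw [hd, hfa, List.getD_eq_getElem _ _ hi_lt]
        simp

lemma loopB_tail (ps : List (List Char)) : ∀ (k : Int) (out : List String), 0 < k →
    (PySem.List.enumerate ps k).foldl text2tokenAltStep out =
      out ++ ps.flatMap (fun q => "<N>" :: chars1 q) := by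
  induction ps with
  | nil => intro k out hk; simp [PySem.List.enumerate_nil]
  | cons p ps IH =>
    intro k out hk
    rw [PySem.List.enumerate_cons, List.foldl_cons]
    have hstep : text2tokenAltStep out (k, p) = out ++ ["<N>"] ++ chars1 p := by
      simp [text2tokenAltStep, hk, chars1]
    rw [hstep, IH (k+1) _ (by omega)]
    simp [chars1]

lemma altB_eq_interB (text : String) :
    text2token_alt text = interB (splitRec text.toList) := by
  unfold text2token_alt
  have hsep : "<N>".toList = ['<','N','>'] := rfl
  rw [hsep, splitOn_eq_splitRec]
  rcases hs : splitRec text.toList with _ | ⟨p, ps⟩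
  · exact absurd hs (splitRec_ne_nil _)
  · rw [PySem.List.enumerate_cons, List.foldl_cons]
    have h0 : text2tokenAltStep [] (0, p) = chars1 p := by
      simp [text2tokenAltStep, chars1]
    rw [h0, loopB_tail ps (0+1) (chars1 p) (by omega)]
    simp [interB]

-- ===== VERDICT (by name: the statement is the Claim_ definition above) =====
theorem text2token_spec : Claim_equal_text2token := by
  intro text _
  unfold Spec_text2token text2token
  rw [altB_eq_interB, ← fA_eq_interB, List.range_eq_range',
    loopA text.toList text.toList.length 0 [] (by omega)]
  simp
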